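-- pv_equiv track=rewrite | github.com/RekGRpth/libphonenumber | my2.py | diap_to_prefix
-- ===== SOURCE A (Python) =====
-- def diap_to_prefix(a, b):
--     def inner(aa, bb, p):
--         if p == 1:
--             if a <= aa <= b:
--                 yield aa
--             return
--
--         for d in range(aa, bb + 1, p):
--             if a <= d and d + p - 1 <= b:
--                 yield d // p
--             elif not (bb < a or aa > b):
--                 for i in range(10):
--                     yield from inner(d + i * p // 10, d + (i + 1) * p // 10 - 1, p // 10)
--
--     a, b = int(a), int(b)
--     p = 10**(max(len(str(x)) for x in (a, b)) - 1)
--     yield from inner(a // p * p, b // p * p + p - 1, p)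
-- ===== SOURCE B (Python) =====
-- def diap_to_prefix(a, b):
--     a, b = int(a), int(b)
--     cap = 10 ** (max(len(str(a)), len(str(b))) - 1)
--     out = []
--     pos = a
--     while pos <= b:
--         step = 1
--         s = 10
--         while s <= cap and pos % s == 0 and pos + s - 1 <= b:
--             step = s
--             s *= 10
--         out.append(pos // step)
--         pos += step
--     return out
-- ===== Notes on version B (the rewrite author's own statement) =====
-- stated objective: simpler
-- what changed: Replaces the recursive generator over nested aligned sub-blocks with a single iterative greedy scan: from pos=a repeatedly take the largest aligned power-of-ten block (capped at 10**(maxlen-1)) that fits below b and emit its prefix.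
-- intended difference: When both bounds are single-digit with a < b (0 <= a < b <= 9), A's p==1 base case ignores the upper bound and returns only [a], silently dropping a+1..b; B returns [a, a+1, ..., b], the covering prefixes the function exists to produce. — e.g. on diap_to_prefix(3, 7): A returns [3], B returns [3, 4, 5, 6, 7]
import Mathlib
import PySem

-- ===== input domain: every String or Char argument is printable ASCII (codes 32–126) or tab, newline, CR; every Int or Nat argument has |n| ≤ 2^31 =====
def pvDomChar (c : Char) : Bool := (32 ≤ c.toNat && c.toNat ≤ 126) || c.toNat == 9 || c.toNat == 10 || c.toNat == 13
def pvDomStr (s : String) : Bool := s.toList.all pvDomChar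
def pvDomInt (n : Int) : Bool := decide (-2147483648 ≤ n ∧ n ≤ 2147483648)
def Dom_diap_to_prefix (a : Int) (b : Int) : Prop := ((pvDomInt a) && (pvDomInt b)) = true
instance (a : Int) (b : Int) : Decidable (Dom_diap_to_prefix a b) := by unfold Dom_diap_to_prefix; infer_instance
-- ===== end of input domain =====

-- B replaces A's recursive generator over nested aligned sub-blocks by an iterative greedy
-- scan that repeatedly emits the largest fitting aligned power-of-ten block (objective: simpler);
-- on 0 ≤ a < b ≤ 9 A's p==1 base case drops a+1..b, B returns them (intended difference D_).


-- ===== PORT A =====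
-- inner(aa, bb, p) of A; fuel is a totality guard only (the top call passes k+1 fuel where
-- p = 10^k, which the recursion p → p//10 never exhausts)
def diapInner (a b : Int) (fuel : Nat) (aa bb p : Int) : List Int :=
  if p = 1 then (if a ≤ aa ∧ aa ≤ b then [aa] else [])
  else match fuel with
    | 0 => []
    | fuel + 1 =>
      (PySem.List.pyRange aa (bb + 1) p).foldl (fun acc d =>
        if a ≤ d ∧ d + p - 1 ≤ b then acc ++ [PySem.Int.floordiv d p]
        else if ¬ (bb < a ∨ aa > b) then
          acc ++ (PySem.List.pyRange 0 10 1).foldl (fun acc2 i =>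
            acc2 ++ diapInner a b fuel (d + PySem.Int.floordiv (i * p) 10)
                      (d + PySem.Int.floordiv ((i + 1) * p) 10 - 1)
                      (PySem.Int.floordiv p 10)) []
        else acc) []

def diap_to_prefix (a : Int) (b : Int) : List Int :=
  let k : Nat := (max (PySem.Str.len (PySem.Int.toStr a)) (PySem.Str.len (PySem.Int.toStr b)) - 1).toNat
  let p : Int := 10 ^ k
  diapInner a b (k + 1) (PySem.Int.floordiv a p * p) (PySem.Int.floordiv b p * p + p - 1) p

-- ===== PORT B =====
-- the inner while loop of B: grow s while the aligned block of size s fits; fuel is a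
-- totality guard (cap.toNat + 1 iterations always suffice since s is multiplied by 10)
def bBestStep (pos b cap : Int) (fuel : Nat) (step s : Int) : Int :=
  match fuel with
  | 0 => step
  | f + 1 =>
      if s ≤ cap ∧ PySem.Int.mod pos s = 0 ∧ pos + s - 1 ≤ b then
        bBestStep pos b cap f s (s * 10)
      else step

-- the outer while loop of B; fuel (b+1-a).toNat suffices since pos grows by step ≥ 1
def bLoop (b cap : Int) (fuel : Nat) (pos : Int) (out : List Int) : List Int :=
  match fuel with
  | 0 => out
  | f + 1 =>
      if pos ≤ b then
        let step := bBestStep pos b cap (cap.toNat + 1) 1 10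
        bLoop b cap f (pos + step) (out ++ [PySem.Int.floordiv pos step])
      else out

def diap_to_prefix_alt (a : Int) (b : Int) : List Int :=
  let cap : Int := 10 ^ ((max (PySem.Str.len (PySem.Int.toStr a)) (PySem.Str.len (PySem.Int.toStr b)) - 1)).toNat
  bLoop b cap (b + 1 - a).toNat a []

-- ===== PRECONDITION & SPEC =====
-- On 0 ≤ a < b ≤ 9 A's p==1 base case ignores the upper bound and returns only [a],
-- silently dropping a+1..b; B returns [a, …, b], the covering prefixes the function is for.
def D_diap_to_prefix (a : Int) (b : Int) : Prop := 0 ≤ a ∧ a < b ∧ b ≤ 9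
instance (a : Int) (b : Int) : Decidable (D_diap_to_prefix a b) := by unfold D_diap_to_prefix; infer_instance

def Spec_diap_to_prefix (a : Int) (b : Int) (out : List Int) : Prop := ¬ D_diap_to_prefix a b → out = diap_to_prefix_alt a b
instance (a : Int) (b : Int) (out : List Int) : Decidable (Spec_diap_to_prefix a b out) := by unfold Spec_diap_to_prefix; infer_instance

def pvDiffWitness_diap_to_prefix : Int × Int := (3, 7)
def pvDiffWitnessOut_diap_to_prefix : (List Int) × (List Int) := ([3], [3, 4, 5, 6, 7])

-- ===== CLAIM (what is proved, stated in full; the proofs are below) =====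
def Claim_unchanged_diap_to_prefix : Prop := ∀ (a : Int) (b : Int), Dom_diap_to_prefix a b → Spec_diap_to_prefix a b (diap_to_prefix a b)
def Claim_changed_diap_to_prefix : Prop := Dom_diap_to_prefix (pvDiffWitness_diap_to_prefix.1) (pvDiffWitness_diap_to_prefix.2) ∧ D_diap_to_prefix (pvDiffWitness_diap_to_prefix.1) (pvDiffWitness_diap_to_prefix.2) ∧ diap_to_prefix (pvDiffWitness_diap_to_prefix.1) (pvDiffWitness_diap_to_prefix.2) = pvDiffWitnessOut_diap_to_prefix.1 ∧ diap_to_prefix_alt (pvDiffWitness_diap_to_prefix.1) (pvDiffWitness_diap_to_prefix.2) = pvDiffWitnessOut_diap_to_prefix.2 ∧ pvDiffWitnessOut_diap_to_prefix.1 ≠ pvDiffWitnessOut_diap_to_prefix.2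
def Claim_exact_diap_to_prefix : Prop := ∀ (a : Int) (b : Int), Dom_diap_to_prefix a b → D_diap_to_prefix a b → diap_to_prefix a b ≠ diap_to_prefix_alt a b

-- ===== LEMMAS AND PROOFS =====

-- largest j ≤ k with 10^j ∣ pos and the block [pos, pos+10^j-1] inside [pos, b] (descending search)
def bjf (pos b : Int) : Nat → Nat
  | 0 => 0
  | j + 1 => if (10 : Int) ^ (j + 1) ∣ pos ∧ pos + 10 ^ (j + 1) - 1 ≤ b then j + 1 else bjf pos b j

theorem bjf_le (pos b : Int) (k : Nat) : bjf pos b k ≤ k := by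
  induction k with
  | zero => simp [bjf]
  | succ j ih => unfold bjf; split <;> omega

theorem bjf_spec1 (pos b : Int) (k : Nat) :
    bjf pos b k = 0 ∨ ((10 : Int) ^ (bjf pos b k) ∣ pos ∧ pos + 10 ^ (bjf pos b k) - 1 ≤ b) := by
  induction k with
  | zero => left; rfl
  | succ j ih =>
      unfold bjf; split
      · right; assumption
      · exact ih

theorem bjf_max (pos b : Int) (k : Nat) (j : Nat) (hj : j ≤ k)
    (hd : (10 : Int) ^ j ∣ pos) (hf : pos + 10 ^ j - 1 ≤ b) : j ≤ bjf pos b k := by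
  induction k with
  | zero => omega
  | succ m ih =>
      unfold bjf; split
      · omega
      · rcases Nat.lt_or_ge j (m + 1) with h | h
        · exact ih (by omega)
        · exfalso; have : j = m + 1 := by omega
          subst this; tauto

theorem bjf_dvd (pos b : Int) (k : Nat) : (10 : Int) ^ (bjf pos b k) ∣ pos := by
  rcases bjf_spec1 pos b k with h | h
  · rw [h]; simp
  · exact h.1

-- the greedy decomposition: repeatedly emit the largest fitting aligned block
def G (k : Nat) (lo hi : Int) : List Int :=
  if h : lo ≤ hi then
    PySem.Int.floordiv lo (10 ^ bjf lo hi k) :: G k (lo + 10 ^ bjf lo hi k) hi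
  else []
termination_by (hi + 1 - lo).toNat
decreasing_by
  have : (0 : Int) < 10 ^ bjf lo hi k := pow_pos (by norm_num) _
  omega

theorem G_nil (k : Nat) (lo hi : Int) (h : hi < lo) : G k lo hi = [] := by
  rw [G]; simp [not_le.mpr h]

theorem G_cons (k : Nat) (lo hi : Int) (h : lo ≤ hi) :
    G k lo hi = PySem.Int.floordiv lo (10 ^ bjf lo hi k) :: G k (lo + 10 ^ bjf lo hi k) hi := by
  rw [G]; simp [h]

theorem dvd_le_of_lt {s x y : Int} (_hs : 0 < s) (hx : s ∣ x) (hy : s ∣ y) (h : x < y) :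
    x + s ≤ y := by
  have h1 : s ∣ y - x := dvd_sub hy hx
  have h2 : s ≤ y - x := Int.le_of_dvd (by omega) h1
  omega

theorem bjf_succ (pos b : Int) (j : Nat) :
    bjf pos b (j + 1) = if (10 : Int) ^ (j + 1) ∣ pos ∧ pos + 10 ^ (j + 1) - 1 ≤ b then j + 1
                        else bjf pos b j := rfl

theorem bjf_congr_hi (pos c hi : Int) (k : Nat) (hc : (10 : Int) ^ k ∣ c)
    (h1 : pos < c) (h2 : c ≤ hi + 1) : ∀ m, m ≤ k → bjf pos (c - 1) m = bjf pos hi m := by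
  intro m hm
  induction m with
  | zero => rfl
  | succ j ih =>
      have hd : (10 : Int) ^ (j + 1) ∣ c := dvd_trans (pow_dvd_pow 10 hm) hc
      have hiff : ((10 : Int) ^ (j + 1) ∣ pos ∧ pos + 10 ^ (j + 1) - 1 ≤ c - 1) ↔
          ((10 : Int) ^ (j + 1) ∣ pos ∧ pos + 10 ^ (j + 1) - 1 ≤ hi) := by
        constructor
        · rintro ⟨hdp, hf⟩; exact ⟨hdp, by omega⟩
        · rintro ⟨hdp, hf⟩
          exact ⟨hdp, by have := dvd_le_of_lt (pow_pos (by norm_num) (j + 1)) hdp hd h1; omega⟩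
      rw [bjf_succ, bjf_succ]
      by_cases hcnd : (10 : Int) ^ (j + 1) ∣ pos ∧ pos + 10 ^ (j + 1) - 1 ≤ hi
      · rw [if_pos (hiff.mpr hcnd), if_pos hcnd]
      · rw [if_neg (fun hh => hcnd (hiff.mp hh)), if_neg hcnd]
        exact ih (by omega)

theorem G_split (k : Nat) (c : Int) (hc : (10 : Int) ^ k ∣ c) :
    ∀ (n : Nat) (lo hi : Int), (hi + 1 - lo).toNat ≤ n →
      G k lo hi = G k lo (min hi (c - 1)) ++ G k (max lo c) hi := by
  intro n
  induction n with
  | zero =>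
      intro lo hi hn
      have h : hi < lo := by omega
      rw [G_nil k lo hi h, G_nil k lo (min hi (c-1)) (by omega), G_nil k (max lo c) hi (by omega)]
      simp
  | succ n ih =>
      intro lo hi hn
      by_cases hlohi : lo ≤ hi
      · by_cases hcl : c ≤ lo
        · rw [G_nil k lo (min hi (c-1)) (by omega)]
          have : max lo c = lo := by omega
          rw [this]; simp
        · by_cases hch : c ≤ hi + 1
          · have hminc : min hi (c - 1) = c - 1 := by omega
            have hmaxc : max lo c = c := by omega
            have hbj := bjf_congr_hi lo c hi k hc (by omega) hch k (le_refl _)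
            have hstep : lo + 10 ^ bjf lo hi k ≤ c := by
              refine dvd_le_of_lt (pow_pos (by norm_num) _) (bjf_dvd lo hi k) ?_ (by omega)
              exact dvd_trans (pow_dvd_pow 10 (bjf_le lo hi k)) hc
            have hpow : (0:Int) < 10 ^ bjf lo hi k := pow_pos (by norm_num) _
            rw [G_cons k lo hi hlohi, hminc, hmaxc,
                G_cons k lo (c-1) (by omega), hbj,
                ih (lo + 10 ^ bjf lo hi k) hi (by omega)]
            have h1 : min hi (c - 1) = c - 1 := by omega
            have h2 : max (lo + 10 ^ bjf lo hi k) c = c := by omega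
            rw [h1, h2]; simp
          · have h1 : min hi (c - 1) = hi := by omega
            have h2 : max lo c = c := by omega
            rw [h1, h2, G_nil k c hi (by omega)]; simp
      · rw [G_nil k lo hi (by omega), G_nil k lo (min hi (c-1)) (by omega),
            G_nil k (max lo c) hi (by omega)]
        simp

theorem G_cap_lower (k : Nat) (d : Int) (hd : (10 : Int) ^ (k + 1) ∣ d) :
    ∀ (n : Nat) (lo hi : Int), (hi + 1 - lo).toNat ≤ n → d ≤ lo → hi ≤ d + 10 ^ (k + 1) - 1 →
      ¬ (lo = d ∧ hi = d + 10 ^ (k + 1) - 1) → G (k + 1) lo hi = G k lo hi := by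
  intro n
  induction n with
  | zero =>
      intro lo hi hn _ _ _
      rw [G_nil _ _ _ (by omega), G_nil _ _ _ (by omega)]
  | succ n ih =>
      intro lo hi hn h2 h3 h4
      by_cases hlohi : lo ≤ hi
      · have hcond : ¬ ((10 : Int) ^ (k + 1) ∣ lo ∧ lo + 10 ^ (k + 1) - 1 ≤ hi) := by
          rintro ⟨hdl, hfit⟩
          have hlod : lo = d := by
            by_contra hne
            have := dvd_le_of_lt (pow_pos (by norm_num) (k + 1)) hd hdl (by omega)
            omega
          subst hlod; exact h4 ⟨rfl, by omega⟩
        have hbj : bjf lo hi (k + 1) = bjf lo hi k := by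
          rw [bjf_succ, if_neg hcond]
        have hpow : (0:Int) < 10 ^ bjf lo hi k := pow_pos (by norm_num) _
        rw [G_cons _ _ _ hlohi, G_cons _ _ _ hlohi, hbj,
            ih (lo + 10 ^ bjf lo hi k) hi (by omega) (by omega) h3 (by omega)]
      · rw [G_nil _ _ _ (by omega), G_nil _ _ _ (by omega)]

theorem G_full (k : Nat) (lo : Int) (hd : (10 : Int) ^ k ∣ lo) :
    G k lo (lo + 10 ^ k - 1) = [PySem.Int.floordiv lo (10 ^ k)] := by
  have hpow : (0:Int) < 10 ^ k := pow_pos (by norm_num) _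
  have hbj : bjf lo (lo + 10 ^ k - 1) k = k := by
    cases k with
    | zero => rfl
    | succ j => unfold bjf; rw [if_pos ⟨hd, by omega⟩]
  rw [G_cons _ _ _ (by omega), hbj, G_nil _ _ _ (by omega)]

theorem G_cover (k : Nat) (lo hi : Int) :
    ∀ (n : Nat) (aa : Int), (10 : Int) ^ k ∣ aa →
      G k (max lo aa) (min hi (aa + (n : Int) * 10 ^ k - 1)) =
        (List.range n).flatMap (fun t : Nat =>
          G k (max lo (aa + (t : Int) * 10 ^ k)) (min hi (aa + (t : Int) * 10 ^ k + 10 ^ k - 1))) := by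
  intro n
  induction n with
  | zero =>
      intro aa _
      have hx : aa + ((0 : Nat) : Int) * 10 ^ k - 1 = aa - 1 := by push_cast; ring
      rw [hx, G_nil _ _ _ (by omega)]; simp
  | succ n ih =>
      intro aa hdvd
      have hpow : (0:Int) < 10 ^ k := pow_pos (by norm_num) _
      have hc : (10 : Int) ^ k ∣ aa + (n : Int) * 10 ^ k := dvd_add hdvd (Dvd.intro_left _ rfl)
      have haac : aa ≤ aa + (n : Int) * 10 ^ k := by
        have : (0:Int) ≤ (n : Int) * 10 ^ k := mul_nonneg (by exact_mod_cast Nat.zero_le n) (le_of_lt hpow)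
        omega
      have he1 : aa + ((n + 1 : Nat) : Int) * 10 ^ k - 1 = aa + (n : Int) * 10 ^ k + 10 ^ k - 1 := by
        push_cast; ring
      rw [List.range_succ, List.flatMap_append, ← ih aa hdvd, he1]
      simp only [List.flatMap_cons, List.flatMap_nil, List.append_nil]
      set c := aa + (n : Int) * 10 ^ k with hcdef
      rw [G_split k c hc ((min hi (c + 10 ^ k - 1) + 1 - max lo aa).toNat) (max lo aa)
            (min hi (c + 10 ^ k - 1)) (le_refl _)]
      rw [show min (min hi (c + 10 ^ k - 1)) (c - 1) = min hi (c - 1) by omega,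
          show max (max lo aa) c = max lo c by omega]

-- my own small congruence: flatMap respects pointwise equality on members
theorem flatMap_congr_mem {α β : Type} {l : List α} {f g : α → List β}
    (h : ∀ x ∈ l, f x = g x) : l.flatMap f = l.flatMap g := by
  induction l with
  | nil => rfl
  | cons x xs ih =>
      simp only [List.flatMap_cons, h x (by simp), ih (fun y hy => h y (by simp [hy]))]

-- ===== A side: the recursive generator computes the greedy decomposition =====

-- one top-level block of A's loop body (proof-side name for the loop body's value)
def gBlock (a b aa nb p : Int) (f : Nat) (d : Int) : List Int :=
  if a ≤ d ∧ d + p - 1 ≤ b then [PySem.Int.floordiv d p]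
  else if ¬ (nb < a ∨ aa > b) then
    (PySem.List.pyRange 0 10 1).foldl (fun acc2 i =>
      acc2 ++ diapInner a b f (d + PySem.Int.floordiv (i * p) 10)
                (d + PySem.Int.floordiv ((i + 1) * p) 10 - 1)
                (PySem.Int.floordiv p 10)) []
  else []

theorem innerA_eq (k : Nat) : ∀ (fuel : Nat) (a b aa : Int) (n : Nat),
    k + 1 ≤ fuel → (10 : Int) ^ k ∣ aa → (k = 0 → n = 1) →
    diapInner a b fuel aa (aa + n * 10 ^ k - 1) (10 ^ k) =
      G k (max a aa) (min b (aa + n * 10 ^ k - 1)) := by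
  induction k with
  | zero =>
      intro fuel a b aa n hfuel hdvd hn0
      have hn1 : n = 1 := hn0 rfl
      subst hn1
      simp only [pow_zero, Nat.cast_one, one_mul]
      rw [show aa + 1 - 1 = aa by ring]
      rw [diapInner.eq_def, if_pos rfl]
      by_cases hc : a ≤ aa ∧ aa ≤ b
      · rw [if_pos hc, G_cons _ _ _ (by omega)]
        have hb : bjf (max a aa) (min b aa) 0 = 0 := rfl
        rw [hb, G_nil _ _ _ (by omega)]
        simp only [pow_zero]
        rw [PySem.Int.floordiv_eq_ediv_of_pos (by norm_num), Int.ediv_one]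
        rw [show max a aa = aa by omega]
      · rw [if_neg hc, G_nil _ _ _ (by omega)]
  | succ k ih =>
      intro fuel a b aa n hfuel hdvd _
      obtain ⟨f, rfl⟩ : ∃ f, fuel = f + 1 := ⟨fuel - 1, by omega⟩
      have hf : k + 1 ≤ f := by omega
      have hpow : (0:Int) < 10 ^ (k + 1) := pow_pos (by norm_num) _
      have hpowk : (0:Int) < 10 ^ k := pow_pos (by norm_num) _
      have hne1 : ¬ ((10:Int) ^ (k + 1) = 1) := by
        have : (1:Int) < 10 ^ (k + 1) := one_lt_pow₀ (by norm_num) (by omega)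
        omega
      rw [diapInner.eq_def, if_neg hne1]
      show (List.foldl _ [] (PySem.List.pyRange aa (aa + (n:Int) * 10 ^ (k + 1) - 1 + 1) (10 ^ (k + 1)))) = _
      rw [show aa + (n:Int) * 10 ^ (k + 1) - 1 + 1 = aa + (n:Int) * 10 ^ (k + 1) by ring]
      have hcnt : PySem.List.pyRange aa (aa + (n:Int) * 10 ^ (k + 1)) (10 ^ (k + 1)) =
          (List.range n).map (fun t : Nat => aa + 10 ^ (k + 1) * (t:Int)) := by
        rw [PySem.List.pyRange_of_pos _ _ hpow]
        congr 1
        by_cases hn : 0 < n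
        · rw [if_pos (by
            have : (0:Int) < (n:Int) * 10 ^ (k + 1) :=
              mul_pos (by exact_mod_cast hn) hpow
            omega)]
          rw [show aa + (n:Int) * 10 ^ (k + 1) - aa + 10 ^ (k + 1) - 1
                = (10 ^ (k + 1) - 1) + (n:Int) * 10 ^ (k + 1) by ring,
              Int.add_mul_ediv_right _ _ (by omega),
              Int.ediv_eq_zero_of_lt (by omega) (by omega)]
          simp
        · have hn0 : n = 0 := by omega
          subst hn0
          rw [if_neg (by push_cast; omega)]
      rw [hcnt]
      refine Eq.trans (PySem.List.foldl_congr_mem _ _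
        (fun acc d => acc ++ gBlock a b aa (aa + (n:Int) * 10 ^ (k + 1) - 1) (10 ^ (k + 1)) f d) []
        ?_) ?_
      · intro acc x _
        simp only [gBlock]
        split_ifs <;> simp
      rw [PySem.List.foldl_append_eq_flatMap, List.nil_append, List.flatMap_map]
      refine Eq.trans (flatMap_congr_mem (g := fun t : Nat =>
        G (k + 1) (max a (aa + (t:Int) * 10 ^ (k + 1)))
          (min b (aa + (t:Int) * 10 ^ (k + 1) + 10 ^ (k + 1) - 1))) ?_) ?_
      · intro t htmem
        have ht : t < n := List.mem_range.mp htmem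
        dsimp only
        rw [show aa + (t:Int) * 10 ^ (k + 1) = aa + 10 ^ (k + 1) * (t:Int) by ring]
        set D := aa + 10 ^ (k + 1) * (t:Int) with hDdef
        have hdvd_d : (10:Int) ^ (k + 1) ∣ D := dvd_add hdvd ⟨(t:Int), rfl⟩
        have hdk : (10:Int) ^ k ∣ D := dvd_trans (pow_dvd_pow 10 (Nat.le_succ k)) hdvd_d
        have haaD : aa ≤ D := by
          have : (0:Int) ≤ 10 ^ (k + 1) * (t:Int) :=
            mul_nonneg (le_of_lt hpow) (by exact_mod_cast Nat.zero_le t)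
          omega
        have hDub : D + 10 ^ (k + 1) ≤ aa + (n:Int) * 10 ^ (k + 1) := by
          have h1 : ((t:Int) + 1) ≤ (n:Int) := by exact_mod_cast ht
          have h2 : 10 ^ (k + 1) * ((t:Int) + 1) ≤ 10 ^ (k + 1) * (n:Int) :=
            mul_le_mul_of_nonneg_left h1 (le_of_lt hpow)
          rw [hDdef]; nlinarith [h2]
        simp only [gBlock]
        split_ifs with hc1 hc2
        · rw [max_eq_right hc1.1, min_eq_right hc1.2]
          exact (G_full (k + 1) D hdvd_d).symm
        · symm
          apply G_nil
          rcases hc2 with hbb | hab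
          · omega
          · omega
        · have hpdiv : PySem.Int.floordiv ((10:Int) ^ (k + 1)) 10 = 10 ^ k := by
            rw [PySem.Int.floordiv_eq_ediv_of_pos (by norm_num), pow_succ,
              Int.mul_ediv_cancel _ (by norm_num)]
          have hidiv : ∀ x : Int, PySem.Int.floordiv (x * 10 ^ (k + 1)) 10 = x * 10 ^ k := by
            intro x
            rw [PySem.Int.floordiv_eq_ediv_of_pos (by norm_num),
              show x * 10 ^ (k + 1) = x * 10 ^ k * 10 by ring,
              Int.mul_ediv_cancel _ (by norm_num)]
          rw [PySem.List.foldl_append_eq_flatMap, List.nil_append]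
          rw [PySem.List.pyRange_one, show ((10:Int) - 0).toNat = 10 by decide,
            List.flatMap_map]
          refine Eq.trans (flatMap_congr_mem (g := fun i : Nat =>
            G k (max a (D + (i:Int) * 10 ^ k)) (min b (D + (i:Int) * 10 ^ k + 10 ^ k - 1))) ?_) ?_
          · intro i _
            rw [show (0:Int) + (i:Int) = (i:Int) by ring, hpdiv, hidiv, hidiv]
            have := ih f a b (D + (i:Int) * 10 ^ k) 1 hf
              (dvd_add hdk (dvd_mul_left _ _)) (fun _ => rfl)
            rw [show D + ((i:Int) + 1) * 10 ^ k - 1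
                  = D + (i:Int) * 10 ^ k + ((1:Nat):Int) * 10 ^ k - 1 by push_cast; ring]
            rw [this]
            rw [show D + (i:Int) * 10 ^ k + ((1:Nat):Int) * 10 ^ k - 1
                  = D + (i:Int) * 10 ^ k + 10 ^ k - 1 by push_cast; ring]
          · have hcov := G_cover k a b 10 D hdk
            have hsh : ∀ i : Nat, D + (i:Int) * 10 ^ k = D + (i:Int) * 10 ^ k := fun _ => rfl
            rw [show ((10:Nat):Int) * 10 ^ k = 10 ^ (k + 1) by push_cast; ring] at hcov
            rw [← hcov]
            rw [show min b (D + 10 ^ (k + 1) - 1) = min b (D + 10 ^ (k + 1) - 1) from rfl]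
            exact (G_cap_lower k D hdvd_d
              ((min b (D + 10 ^ (k + 1) - 1) + 1 - max a D).toNat) (max a D)
              (min b (D + 10 ^ (k + 1) - 1)) (le_refl _) (le_max_right _ _)
              (min_le_right _ _)
              (by
                rintro ⟨h4a, h4b⟩
                exact hc1 ⟨by omega, by omega⟩)).symm
      · exact (G_cover (k + 1) a b n aa hdvd).symm

-- ===== B side: the greedy loop computes the greedy decomposition =====

theorem bBestStep_eq (pos b : Int) (K : Nat) :
    ∀ (fuel j : Nat), K + 1 ≤ fuel + j →
      (j = 0 ∨ (j ≤ K ∧ (10 : Int) ^ j ∣ pos ∧ pos + 10 ^ j - 1 ≤ b)) →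
      bBestStep pos b (10 ^ K) fuel ((10 : Int) ^ j) ((10 : Int) ^ j * 10) = 10 ^ bjf pos b K := by
  intro fuel
  induction fuel with
  | zero =>
      intro j hf hinv
      exfalso
      rcases hinv with h | h
      · omega
      · omega
  | succ f ih =>
      intro j hf hinv
      have hjK : j ≤ K := by
        rcases hinv with h | h
        · omega
        · exact h.1
      have hps : (10 : Int) ^ j * 10 = 10 ^ (j + 1) := (pow_succ 10 j).symm
      have hcnd_iff : ((10 : Int) ^ j * 10 ≤ 10 ^ K ∧ PySem.Int.mod pos (10 ^ j * 10) = 0 ∧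
            pos + 10 ^ j * 10 - 1 ≤ b) ↔
          (j + 1 ≤ K ∧ (10 : Int) ^ (j + 1) ∣ pos ∧ pos + 10 ^ (j + 1) - 1 ≤ b) := by
        rw [hps, PySem.Int.mod_eq_zero_iff_dvd, pow_le_pow_iff_right₀ (by norm_num : (1:Int) < 10)]
      rw [bBestStep]
      by_cases hcnd : (j + 1 ≤ K ∧ (10 : Int) ^ (j + 1) ∣ pos ∧ pos + 10 ^ (j + 1) - 1 ≤ b)
      · rw [if_pos (hcnd_iff.mpr hcnd), hps]
        exact ih (j + 1) (by omega) (Or.inr hcnd)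
      · rw [if_neg (fun hh => hcnd (hcnd_iff.mp hh))]
        have hbj : bjf pos b K = j := by
          have hle : j ≤ bjf pos b K := by
            rcases hinv with h | h
            · omega
            · exact bjf_max pos b K j h.1 h.2.1 h.2.2
          have hge : bjf pos b K ≤ j := by
            by_contra hgt
            have hr1 : j + 1 ≤ bjf pos b K := by omega
            rcases bjf_spec1 pos b K with h0 | h0
            · omega
            · refine hcnd ⟨by have := bjf_le pos b K; omega, ?_, ?_⟩
              · exact dvd_trans (pow_dvd_pow 10 hr1) h0.1
              · have : (10:Int) ^ (j + 1) ≤ 10 ^ bjf pos b K :=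
                  (pow_le_pow_iff_right₀ (by norm_num : (1:Int) < 10)).mpr hr1
                omega
          omega
        rw [hbj]

theorem bLoop_eq (b : Int) (K : Nat) :
    ∀ (fuel : Nat) (pos : Int) (acc : List Int), (b + 1 - pos).toNat ≤ fuel →
      bLoop b (10 ^ K) fuel pos acc = acc ++ G K pos b := by
  intro fuel
  induction fuel with
  | zero =>
      intro pos acc h
      rw [bLoop, G_nil _ _ _ (by omega)]; simp
  | succ f ih =>
      intro pos acc h
      rw [bLoop]
      by_cases hpb : pos ≤ b
      · rw [if_pos hpb]
        have htn : ((10 : Int) ^ K).toNat = 10 ^ K := by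
          rw [show ((10:Int) ^ K) = ((10 ^ K : Nat) : Int) by push_cast; ring]
          exact Int.toNat_natCast _
        have hstep : bBestStep pos b (10 ^ K) (((10 : Int) ^ K).toNat + 1) 1 10 = 10 ^ bjf pos b K := by
          have h10 : ((10 : Int) ^ 0, (10 : Int) ^ 0 * 10) = (1, 10) := by norm_num
          have := bBestStep_eq pos b K (((10 : Int) ^ K).toNat + 1) 0
            (by rw [htn]; have := Nat.lt_pow_self (n := K) (a := 10) (by norm_num); omega)
            (Or.inl rfl)
          simpa using this
        have hpow : (0:Int) < 10 ^ bjf pos b K := pow_pos (by norm_num) _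
        rw [hstep, ih (pos + 10 ^ bjf pos b K) _ (by omega), G_cons K pos b hpb]
        simp
      · rw [if_neg hpb, G_nil _ _ _ (by omega)]; simp

theorem alt_eq_G (a b : Int) :
    diap_to_prefix_alt a b =
      G ((max (PySem.Str.len (PySem.Int.toStr a)) (PySem.Str.len (PySem.Int.toStr b)) - 1)).toNat a b := by
  show bLoop b _ _ a [] = _
  rw [bLoop_eq b _ (b + 1 - a).toNat a [] (le_refl _)]
  simp

-- ===== digit-length facts =====

theorem tdc_mono (f : Nat) : ∀ (n : Nat) (l : List Char),
    l.length ≤ (Nat.toDigitsCore 10 f n l).length := by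
  induction f with
  | zero => intro n l; simp [Nat.toDigitsCore]
  | succ f ih =>
      intro n l
      rw [Nat.toDigitsCore]
      by_cases h : n / 10 = 0
      · rw [if_pos h]; simp
      · rw [if_neg h]
        calc l.length ≤ (Nat.digitChar (n % 10) :: l).length := by simp
          _ ≤ _ := ih _ _

theorem tdc_ge1 (f n : Nat) (l : List Char) (hf : 0 < f) :
    l.length + 1 ≤ (Nat.toDigitsCore 10 f n l).length := by
  cases f with
  | zero => omega
  | succ f =>
      rw [Nat.toDigitsCore]
      by_cases h : n / 10 = 0
      · rw [if_pos h]; simp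
      · rw [if_neg h]
        calc l.length + 1 = (Nat.digitChar (n % 10) :: l).length := by simp
          _ ≤ _ := tdc_mono _ _ _

theorem toDigits_ge1 (n : Nat) : 1 ≤ (Nat.toDigits 10 n).length := by
  have := tdc_ge1 (n + 1) n [] (by omega)
  simpa [Nat.toDigits] using this

theorem toDigits_ge2 (n : Nat) (h : 10 ≤ n) : 2 ≤ (Nat.toDigits 10 n).length := by
  have hd : n / 10 ≠ 0 := by
    have : 1 ≤ n / 10 := Nat.le_div_iff_mul_le (by norm_num) |>.mpr (by omega)
    omega
  show 2 ≤ (Nat.toDigitsCore 10 (n + 1) n []).length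
  rw [Nat.toDigitsCore, if_neg hd]
  have := tdc_ge1 n (n / 10) [Nat.digitChar (n % 10)] (by omega)
  simpa using this

theorem len_toStr_eq (x : Int) :
    PySem.Str.len (PySem.Int.toStr x) = ((PySem.Int.toChars x).length : Int) := by
  rw [PySem.Str.len_eq, PySem.Int.toList_toStr]

theorem len_toStr_pos (x : Int) : 1 ≤ PySem.Str.len (PySem.Int.toStr x) := by
  rw [len_toStr_eq, PySem.Int.toChars]
  by_cases hx : x < 0
  · rw [if_pos hx]; simp
  · rw [if_neg hx]
    exact_mod_cast toDigits_ge1 x.toNat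

theorem len_toStr_one_iff (x : Int) :
    PySem.Str.len (PySem.Int.toStr x) = 1 ↔ 0 ≤ x ∧ x ≤ 9 := by
  constructor
  · intro h
    rw [len_toStr_eq, PySem.Int.toChars] at h
    by_cases hx : x < 0
    · rw [if_pos hx] at h
      exfalso
      have h1 := toDigits_ge1 x.natAbs
      simp only [List.length_cons] at h
      omega
    · rw [if_neg hx] at h
      refine ⟨by omega, ?_⟩
      by_contra hgt
      have h10 : 10 ≤ x.toNat := by omega
      have := toDigits_ge2 x.toNat h10
      omega
  · rintro ⟨h0, h9⟩
    interval_cases x <;> decide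

-- length of the greedy decomposition at cap 10^0 = 1: one element per integer of the interval
theorem G0_len : ∀ (n : Nat) (lo hi : Int), (hi + 1 - lo).toNat ≤ n →
    (G 0 lo hi).length = (hi + 1 - lo).toNat := by
  intro n
  induction n with
  | zero => intro lo hi h; rw [G_nil _ _ _ (by omega)]; simp; omega
  | succ n ih =>
      intro lo hi h
      by_cases hlh : lo ≤ hi
      · rw [G_cons _ _ _ hlh]
        have : bjf lo hi 0 = 0 := rfl
        rw [this]
        simp only [pow_zero, List.length_cons]
        rw [ih (lo + 1) hi (by omega)]
        omega
      · rw [G_nil _ _ _ (by omega)]; simp; omega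

-- ===== VERDICT (by name: the statement is the Claim_ definition above) =====
theorem diap_to_prefix_spec : Claim_unchanged_diap_to_prefix := by
  intro a b _ hnD
  rw [alt_eq_G]
  simp only [diap_to_prefix]
  set La := PySem.Str.len (PySem.Int.toStr a) with hLa
  set Lb := PySem.Str.len (PySem.Int.toStr b) with hLb
  cases hKc : (max La Lb - 1).toNat with
  | zero =>
      have hLa1 : La = 1 := by have := len_toStr_pos a; have := len_toStr_pos b; omega
      have hLb1 : Lb = 1 := by have := len_toStr_pos a; have := len_toStr_pos b; omega
      have ha9 : 0 ≤ a ∧ a ≤ 9 := (len_toStr_one_iff a).mp hLa1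
      have hb9 : 0 ≤ b ∧ b ≤ 9 := (len_toStr_one_iff b).mp hLb1
      have hba : b ≤ a := by
        by_contra hlt
        exact hnD ⟨ha9.1, by omega, hb9.2⟩
      have hfd : ∀ x : Int, PySem.Int.floordiv x 1 = x := fun x => by
        rw [PySem.Int.floordiv_eq_ediv_of_pos (by norm_num), Int.ediv_one]
      simp only [pow_zero, mul_one, hfd]
      rw [show b + 1 - 1 = b by ring]
      rw [diapInner.eq_def, if_pos rfl]
      by_cases hab : a ≤ b
      · have heq : a = b := le_antisymm hab hba
        subst heq
        rw [if_pos ⟨le_refl a, le_refl a⟩, G_cons _ _ _ (le_refl a)]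
        have hb0 : bjf a a 0 = 0 := rfl
        rw [hb0, G_nil _ _ _ (by omega)]
        simp only [pow_zero]
        rw [hfd]
      · rw [if_neg (fun h => hab h.2), G_nil _ _ _ (by omega)]
  | succ k =>
      have hP : (0:Int) < 10 ^ (k + 1) := pow_pos (by norm_num) _
      set m := PySem.Int.floordiv a (10 ^ (k + 1)) with hm
      set q := PySem.Int.floordiv b (10 ^ (k + 1)) with hq
      have hm1 : m * 10 ^ (k + 1) ≤ a ∧ a < m * 10 ^ (k + 1) + 10 ^ (k + 1) := by
        have := (PySem.Int.floordiv_eq_iff_of_pos hP).mp hm.symm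
        rw [show (m + 1) * 10 ^ (k + 1) = m * 10 ^ (k + 1) + 10 ^ (k + 1) by ring] at this
        exact this
      have hq1 : q * 10 ^ (k + 1) ≤ b ∧ b < q * 10 ^ (k + 1) + 10 ^ (k + 1) := by
        have := (PySem.Int.floordiv_eq_iff_of_pos hP).mp hq.symm
        rw [show (q + 1) * 10 ^ (k + 1) = q * 10 ^ (k + 1) + 10 ^ (k + 1) by ring] at this
        exact this
      by_cases hmq : m ≤ q
      · set n := (q - m + 1).toNat with hn
        have hnc : (n:Int) = q - m + 1 := Int.toNat_of_nonneg (by omega)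
        have hbbe : q * 10 ^ (k + 1) + 10 ^ (k + 1) - 1
            = m * 10 ^ (k + 1) + (n:Int) * 10 ^ (k + 1) - 1 := by rw [hnc]; ring
        rw [hbbe]
        rw [innerA_eq (k + 1) (k + 1 + 1) a b (m * 10 ^ (k + 1)) n (le_refl _)
              (dvd_mul_left _ _) (fun h => absurd h (Nat.succ_ne_zero k))]
        rw [show m * 10 ^ (k + 1) + (n:Int) * 10 ^ (k + 1) - 1
              = q * 10 ^ (k + 1) + 10 ^ (k + 1) - 1 from hbbe.symm]
        rw [max_eq_left hm1.1, min_eq_left (by omega)]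
      · have hqm : q * 10 ^ (k + 1) + 10 ^ (k + 1) ≤ m * 10 ^ (k + 1) := by
          have : (q + 1) * 10 ^ (k + 1) ≤ m * 10 ^ (k + 1) :=
            mul_le_mul_of_nonneg_right (by omega) (le_of_lt hP)
          rw [show (q + 1) * 10 ^ (k + 1) = q * 10 ^ (k + 1) + 10 ^ (k + 1) by ring] at this
          exact this
        have hne1 : ¬ ((10:Int) ^ (k + 1) = 1) := by
          have : (1:Int) < 10 ^ (k + 1) := one_lt_pow₀ (by norm_num) (Nat.succ_ne_zero k)
          omega
        rw [diapInner.eq_def, if_neg hne1]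
        rw [show q * 10 ^ (k + 1) + 10 ^ (k + 1) - 1 + 1 = q * 10 ^ (k + 1) + 10 ^ (k + 1) by ring]
        rw [PySem.List.pyRange_of_pos _ _ hP, if_neg (by omega)]
        rw [G_nil _ _ _ (by omega)]
        simp

theorem diap_to_prefix_changed : Claim_changed_diap_to_prefix := by unfold Claim_changed_diap_to_prefix; decide

theorem diap_to_prefix_tight : Claim_exact_diap_to_prefix := by
  intro a b _ hD
  obtain ⟨h0, hab, h9⟩ := hD
  have hLa1 : PySem.Str.len (PySem.Int.toStr a) = 1 := (len_toStr_one_iff a).mpr ⟨h0, by omega⟩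
  have hLb1 : PySem.Str.len (PySem.Int.toStr b) = 1 := (len_toStr_one_iff b).mpr ⟨by omega, h9⟩
  have hK0 : (max (PySem.Str.len (PySem.Int.toStr a)) (PySem.Str.len (PySem.Int.toStr b)) - 1).toNat = 0 := by
    rw [hLa1, hLb1]; decide
  have hfd : ∀ x : Int, PySem.Int.floordiv x 1 = x := fun x => by
    rw [PySem.Int.floordiv_eq_ediv_of_pos (by norm_num), Int.ediv_one]
  have hA : diap_to_prefix a b = [a] := by
    simp only [diap_to_prefix, hK0, pow_zero, mul_one, hfd]
    rw [show b + 1 - 1 = b by ring]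
    rw [diapInner.eq_def, if_pos rfl, if_pos ⟨le_refl a, by omega⟩]
  have hB : (diap_to_prefix_alt a b).length = (b + 1 - a).toNat := by
    rw [alt_eq_G, hK0]
    exact G0_len (b + 1 - a).toNat a b (le_refl _)
  intro heq
  rw [heq] at hA
  have := congrArg List.length hA
  rw [hB] at this
  simp only [List.length_cons, List.length_nil] at this
  omega
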